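-- pv_equiv track=rewrite | github.com/yejipractice/PS_Practice | 백준/기출/이차원 배열과 연산.py | c_op
-- ===== SOURCE A (Python) =====
-- def put_zero(graph, n):
--     for idx in range(len(graph)):
--         if len(graph[idx]) < n:
--             for i in range(n-len(graph[idx])):
--                 graph[idx].append(0)
--     return graph
--
-- def reverse(graph):
--     tmp_graph = []
--     for cidx in range(len(graph[0])):
--         tmp = []
--         for ridx in range(len(graph)):
--             tmp.append(graph[ridx][cidx])
--         tmp_graph.append(tmp)
--     return tmp_graph
--
-- def c_op(graph):
--     tmp_graph = []
--     max_n = 0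
--     for cidx in range(min(len(graph[0]), 100)):
--         tmp = []
--         stores = dict()
--         for ridx in range(min(len(graph), 100)):
--             if stores.get(graph[ridx][cidx], False) == False:
--                 stores[graph[ridx][cidx]] = 1
--             else:
--                 stores[graph[ridx][cidx]] += 1
--         for node in stores.keys():
--             tmp.append((node, stores[node]))
--             tmp.sort(key=lambda x: (x[1], x[0]))
--         tg = []
--         for number, cnt in tmp:
--             if number == 0:
--                 continue
--             tg.append(number)
--             tg.append(cnt)
--         max_n = max(max_n, len(tg))
--         tmp_graph.append(tg)
--     tmp_graph = put_zero(tmp_graph, max_n)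
--     tmp_graph = reverse(tmp_graph)
--     return tmp_graph
-- ===== SOURCE B (Python) =====
-- def _rle(svals):
--     # run-length encode an ascending-sorted list into (value, run length) pairs
--     if not svals:
--         return []
--     v = svals[0]
--     i = 1
--     while i < len(svals) and svals[i] == v:
--         i += 1
--     return [(v, i)] + _rle(svals[i:])
--
-- def c_op(graph):
--     ncols = min(len(graph[0]), 100)
--     nrows = min(len(graph), 100)
--     cols = []
--     for c in range(ncols):
--         svals = sorted(graph[r][c] for r in range(nrows))
--         pairs = sorted(_rle(svals), key=lambda p: (p[1], p[0]))
--         cols.append([x for v, cnt in pairs if v != 0 for x in (v, cnt)])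
--     max_n = max(map(len, cols), default=0)
--     return [[col[r] if r < len(col) else 0 for col in cols]
--             for r in range(max_n)]
-- ===== Notes on version B (the rewrite author's own statement) =====
-- stated objective: faster
-- what changed: Per column B drops A's dict counting and repeated re-sorting entirely: it sorts the column's values once and run-length-encodes the sorted run structure into (value,count) pairs, sorts those pairs once by (count,value), and then builds the output rows directly by indexing the compacted columns, eliminating A's put_zero padding pass and reverse transpose pass.
-- outside the precondition, e.g. on c_op([]): A raises IndexError, B raises IndexError; on c_op([[]]): A raises IndexError, B returns []; on c_op([[1, 2], [3]]): A raises IndexError, B raises IndexError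
import Mathlib
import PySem

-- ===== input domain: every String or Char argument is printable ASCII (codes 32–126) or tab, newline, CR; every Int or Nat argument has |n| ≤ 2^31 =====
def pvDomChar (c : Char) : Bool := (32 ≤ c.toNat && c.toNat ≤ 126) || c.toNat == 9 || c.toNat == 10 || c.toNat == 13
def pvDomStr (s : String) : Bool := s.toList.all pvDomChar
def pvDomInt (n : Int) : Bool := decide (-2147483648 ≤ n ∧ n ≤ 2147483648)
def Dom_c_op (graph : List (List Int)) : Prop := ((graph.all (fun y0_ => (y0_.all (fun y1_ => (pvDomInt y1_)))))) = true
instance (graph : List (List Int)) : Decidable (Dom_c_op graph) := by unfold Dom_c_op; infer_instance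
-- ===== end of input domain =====

-- B replaces A's dict counting + repeated re-sorting by sorting each column once and
-- run-length-encoding the sorted values, then builds the output rows directly by indexing
-- the compacted columns instead of A's put_zero padding pass and reverse transpose pass.

-- ===== PORT A =====
def put_zero_port (g : List (List Int)) (n : Int) : List (List Int) :=
  g.map (fun row =>
    if (row.length : Int) < n then
      (PySem.List.pyRange 0 (n - (row.length : Int)) 1).foldl (fun r _ => r ++ [(0 : Int)]) row
    else row)

def reverse_port (g : List (List Int)) : List (List Int) :=
  (PySem.List.pyRange 0 ((g.headD []).length : Int) 1).foldl
    (fun acc cidx =>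
      acc ++ [(PySem.List.pyRange 0 (g.length : Int) 1).foldl
        (fun tmp ridx => tmp ++ [PySem.List.pyGetD (PySem.List.pyGetD g ridx []) cidx 0]) []])
    []

-- the body of A's outer loop, factored as helpers (stores / tmp+tg per column)
def c_op_stores (graph : List (List Int)) (cidx : Int) : PySem.Dict Int Int :=
  (PySem.List.pyRange 0 (min (graph.length : Int) 100) 1).foldl
    (fun d ridx =>
      let v := PySem.List.pyGetD (PySem.List.pyGetD graph ridx []) cidx 0
      if d.getD v 0 == 0 then d.insert v 1 else d.insert v (d.getD v 0 + 1))
    PySem.Dict.empty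

def c_op_col (graph : List (List Int)) (cidx : Int) : List Int :=
  let stores := c_op_stores graph cidx
  let tmp := stores.keys.foldl
    (fun tmp node =>
      PySem.List.sorted2 (tmp ++ [(node, stores.getD node 0)]) (fun x => x.2) (fun x => x.1))
    []
  tmp.foldl (fun tg p => if p.1 == 0 then tg else tg ++ [p.1, p.2]) []

def c_op (graph : List (List Int)) : List (List Int) :=
  let st :=
    (PySem.List.pyRange 0 (min ((graph.headD []).length : Int) 100) 1).foldl
      (fun (st : List (List Int) × Int) cidx =>
        let tg := c_op_col graph cidx
        (st.1 ++ [tg], max st.2 (tg.length : Int)))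
      ([], 0)
  reverse_port (put_zero_port st.1 st.2)

-- ===== PORT B =====
-- _rle: the while loop counting the leading run is takeWhile/dropWhile on the same predicate
def rlePort : List Int → List (Int × Int)
  | [] => []
  | v :: rest =>
    (v, ((rest.takeWhile (fun x => x == v)).length : Int) + 1) ::
      rlePort (rest.dropWhile (fun x => x == v))
  termination_by s => s.length
  decreasing_by
    simp only [List.length_cons]
    have := List.length_dropWhile_le (fun x => x == v) rest
    omega

def colCompact (graph : List (List Int)) (c : Int) (nrows : Int) : List Int :=
  let svals := PySem.List.sorted
    ((PySem.List.pyRange 0 nrows 1).map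
      (fun r => PySem.List.pyGetD (PySem.List.pyGetD graph r []) c 0)) (fun x => x)
  let pairs := PySem.List.sorted2 (rlePort svals) (fun x => x.2) (fun x => x.1)
  (pairs.filter (fun p => p.1 != 0)).flatMap (fun p => [p.1, p.2])

def c_op_alt (graph : List (List Int)) : List (List Int) :=
  let ncols : Int := min ((graph.headD []).length : Int) 100
  let nrows : Int := min (graph.length : Int) 100
  let cols := (PySem.List.pyRange 0 ncols 1).map (fun c => colCompact graph c nrows)
  -- max(generator, default=0): lengths are ≥ 0, so the running max from 0 is exact here
  let max_n : Int := (cols.map (fun t => (t.length : Int))).foldl max 0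
  (PySem.List.pyRange 0 max_n 1).map (fun r =>
    cols.map (fun col =>
      if r < (col.length : Int) then PySem.List.pyGetD col r 0 else 0))

-- ===== PRECONDITION & SPEC =====
-- Pre_ excludes exactly the inputs where A raises IndexError: the empty graph and graphs with an
-- empty first row (reverse() indexes an empty list), and ragged graphs where some of the first
-- min(len,100) rows is shorter than the first row's capped width (column indexing fails).
def Pre_c_op (graph : List (List Int)) : Prop :=
  graph ≠ [] ∧ graph.headD [] ≠ [] ∧
  ∀ row ∈ graph.take 100, min (graph.headD []).length 100 ≤ row.length
instance (graph : List (List Int)) : Decidable (Pre_c_op graph) := by unfold Pre_c_op; infer_instance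
def pvWitness_c_op : List (List Int) := [[1]]

def Spec_c_op (graph : List (List Int)) (out : List (List Int)) : Prop := out = c_op_alt graph
instance (graph : List (List Int)) (out : List (List Int)) : Decidable (Spec_c_op graph out) := by unfold Spec_c_op; infer_instance

-- ===== CLAIM (what is proved, stated in full; the proofs are below) =====
def Claim_equal_c_op : Prop := ∀ (graph : List (List Int)), Dom_c_op graph → Pre_c_op graph → Spec_c_op graph (c_op graph)

-- ===== LEMMAS AND PROOFS =====

-- the value A/B read at (r, c); under Dom it is an entry of graph or the default 0, hence bounded
def vAt (graph : List (List Int)) (r c : Int) : Int :=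
  PySem.List.pyGetD (PySem.List.pyGetD graph r []) c 0

-- encode Python's lexicographic (count, value) sort key as a single Int (values are Dom-bounded)
def pkey (p : Int × Int) : Int := p.2 * 2 ^ 33 + p.1

def goodP (p : Int × Int) : Prop := -2147483648 ≤ p.1 ∧ p.1 ≤ 2147483648

lemma pyGetD_mem_or_eq {α : Type} (xs : List α) (i : Int) (d : α) :
    PySem.List.pyGetD xs i d ∈ xs ∨ PySem.List.pyGetD xs i d = d := by
  unfold PySem.List.pyGetD PySem.List.pyGet?
  rcases h : PySem.List.pyIdx? xs.length i with _ | k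
  · simp
  · rcases h2 : xs[k]? with _ | x
    · simp [h2]
    · simp [h2]
      exact Or.inl (List.mem_of_getElem? h2)

lemma vAt_good (graph : List (List Int)) (hD : Dom_c_op graph) (r c : Int) :
    -2147483648 ≤ vAt graph r c ∧ vAt graph r c ≤ 2147483648 := by
  rcases pyGetD_mem_or_eq (PySem.List.pyGetD graph r []) c 0 with hv | hv
  · rcases pyGetD_mem_or_eq graph r [] with hr | hr
    · unfold Dom_c_op at hD
      simp only [List.all_eq_true, pvDomInt, decide_eq_true_eq] at hD
      have := hD _ hr _ hv
      unfold vAt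
      omega
    · rw [hr] at hv; simp at hv
  · unfold vAt; rw [hv]; norm_num

-- A's guarded dict update is the unconditional counting update
lemma stores_eq_counts (graph : List (List Int)) (cidx nrows : Int) :
    (PySem.List.pyRange 0 nrows 1).foldl
      (fun d ridx =>
        let v := PySem.List.pyGetD (PySem.List.pyGetD graph ridx []) cidx 0
        if d.getD v 0 == 0 then d.insert v 1 else d.insert v (d.getD v 0 + 1))
      (PySem.Dict.empty : PySem.Dict Int Int)
    = (PySem.List.pyRange 0 nrows 1).foldl
      (fun d r =>
        let v := PySem.List.pyGetD (PySem.List.pyGetD graph r []) cidx 0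
        d.insert v (d.getD v 0 + 1))
      (PySem.Dict.empty : PySem.Dict Int Int) := by
  apply PySem.List.foldl_congr_mem
  intro d x _
  simp only
  by_cases h : d.getD (PySem.List.pyGetD (PySem.List.pyGetD graph x []) cidx 0) 0 = 0
  · simp [h]
  · simp [h]

-- the two comparators agree on Dom-bounded pairs
lemma lt2_eq_pkey (p q : Int × Int) (hp : goodP p) (hq : goodP q) :
    (decide (p.2 < q.2) || (!decide (q.2 < p.2) && decide (p.1 < q.1))) = decide (pkey p < pkey q) := by
  unfold pkey goodP at *
  simp only [show ((2:Int) ^ 33) = 8589934592 by norm_num] at *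
  obtain ⟨hp1, hp2⟩ := hp
  obtain ⟨hq1, hq2⟩ := hq
  rcases lt_trichotomy p.2 q.2 with h | h | h
  · have hk : p.2 * 8589934592 + p.1 < q.2 * 8589934592 + q.1 := by omega
    simp [h, hk]
  · simp [h]
  · have h1 : ¬ (p.2 < q.2) := by omega
    have hk : ¬ (p.2 * 8589934592 + p.1 < q.2 * 8589934592 + q.1) := by omega
    simp [h1, h, hk]

lemma insertBy_congr {α : Type} (b1 b2 : α → α → Bool) (x : α) (ys : List α)
    (h : ∀ y ∈ ys, b1 x y = b2 x y) :
    PySem.List.insertBy b1 x ys = PySem.List.insertBy b2 x ys := by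
  induction ys with
  | nil => rfl
  | cons y ys ih =>
    have hstep : ∀ (b : α → α → Bool),
        PySem.List.insertBy b x (y :: ys) = if b x y then x :: y :: ys else y :: PySem.List.insertBy b x ys :=
      fun b => rfl
    rw [hstep, hstep, h y (by simp)]
    by_cases hxy : b2 x y = true
    · simp [hxy]
    · simp only [Bool.not_eq_true] at hxy
      simp [hxy, ih (fun y hy => h y (by simp [hy]))]

lemma foldl_insertBy_congr {α : Type} (b1 b2 : α → α → Bool) (good : α → Prop)
    (hb : ∀ x y, good x → good y → b1 x y = b2 x y) :
    ∀ (xs acc : List α), (∀ x ∈ xs, good x) → (∀ x ∈ acc, good x) →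
      xs.foldl (fun a x => PySem.List.insertBy b1 x a) acc
        = xs.foldl (fun a x => PySem.List.insertBy b2 x a) acc := by
  intro xs
  induction xs with
  | nil => intro acc _ _; rfl
  | cons x xs ih =>
    intro acc hxs hacc
    simp only [List.foldl_cons]
    rw [insertBy_congr b1 b2 x acc (fun y hy => hb x y (hxs x (by simp)) (hacc y hy))]
    exact ih _ (fun z hz => hxs z (by simp [hz]))
      (fun z hz => ((PySem.List.mem_insertBy b2 x z acc).mp hz).elim
        (fun he => he ▸ hxs x (by simp)) (fun he => hacc z he))

lemma sorted2_eq_sorted_pkey (L : List (Int × Int)) (hL : ∀ p ∈ L, goodP p) :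
    PySem.List.sorted2 L (fun x => x.2) (fun x => x.1) = PySem.List.sorted L pkey := by
  rw [PySem.List.sorted_eq_foldl_insertBy]
  show L.foldl (fun a x => PySem.List.insertBy
      (fun a b => decide (a.2 < b.2) || (!decide (b.2 < a.2) && decide (a.1 < b.1))) x a) []
    = _
  exact foldl_insertBy_congr _ _ goodP (fun x y hx hy => lt2_eq_pkey x y hx hy) L [] hL (by simp)

-- re-sorting after every append is one sort of the whole list
lemma rep_sort (L : List (Int × Int)) (pre : List (Int × Int))
    (hL : ∀ p ∈ L, goodP p) (hpre : ∀ p ∈ pre, goodP p) :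
    L.foldl (fun t p => PySem.List.sorted2 (t ++ [p]) (fun x => x.2) (fun x => x.1))
      (PySem.List.sorted pre pkey)
    = PySem.List.sorted (pre ++ L) pkey := by
  induction L generalizing pre with
  | nil => rw [List.foldl_nil, List.append_nil]
  | cons p L ih =>
    simp only [List.foldl_cons]
    have hgood : ∀ q ∈ PySem.List.sorted pre pkey ++ [p], goodP q := by
      intro q hq
      rcases List.mem_append.mp hq with h | h
      · exact hpre q ((PySem.List.mem_sorted pre pkey false q).mp h)
      · simp only [List.mem_singleton] at h
        exact h ▸ hL p (by simp)
    rw [sorted2_eq_sorted_pkey _ hgood]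
    have key : ∀ (M : List (Int × Int)) (x : Int × Int), PySem.List.sorted (M ++ [x]) pkey
        = PySem.List.insertBy (fun a b => decide (pkey a < pkey b)) x (PySem.List.sorted M pkey) := by
      intro M x
      rw [PySem.List.sorted_eq_foldl_insertBy, PySem.List.sorted_eq_foldl_insertBy, List.foldl_append]
      rfl
    rw [key, PySem.List.sorted_sorted, ← key]
    have hpre' : ∀ q ∈ pre ++ [p], goodP q := by
      intro q hq
      rcases List.mem_append.mp hq with h | h
      · exact hpre q h
      · simp only [List.mem_singleton] at h
        exact h ▸ hL p (by simp)
    have := ih (pre ++ [p]) (fun q hq => hL q (by simp [hq])) hpre'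
    rw [this, List.append_assoc]
    rfl

-- A's if/continue append loop is filter + flatMap
lemma tg_eq_flatMap (L : List (Int × Int)) (acc : List Int) :
    L.foldl (fun tg p => if p.1 == 0 then tg else tg ++ [p.1, p.2]) acc
      = acc ++ (L.filter (fun p => p.1 != 0)).flatMap (fun p => [p.1, p.2]) := by
  induction L generalizing acc with
  | nil => simp
  | cons p L ih =>
    simp only [List.foldl_cons, List.filter_cons]
    by_cases h : p.1 = 0
    · rw [if_pos (by simp [h]), show (p.1 != 0) = false by simp [h]]
      rw [ih]
      simp
    · rw [if_neg (by simp [h]), show (p.1 != 0) = true by simp [h]]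
      rw [ih]
      simp [List.append_assoc]

-- ===== the run-length encoding of a sorted list =====

lemma drop_head_false {p : Int → Bool} {l : List Int} {x : Int} {xs : List Int}
    (h : l.dropWhile p = x :: xs) : p x = false := by
  have hne : l.dropWhile p ≠ [] := by rw [h]; simp
  have h2 := List.head_dropWhile_not p hne
  have h3 : (l.dropWhile p).head hne = x := by
    have h4 := congrArg List.head? h
    rw [List.head?_eq_some_head hne] at h4
    simpa using h4
  rwa [h3] at h2

-- v is strictly below everything in the dropped tail of a sorted list
lemma lt_of_mem_drop (v : Int) (rest : List Int)
    (hs : (v :: rest).Pairwise (· ≤ ·)) :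
    ∀ w ∈ rest.dropWhile (fun x => x == v), v < w := by
  obtain ⟨hvle, hpwrest⟩ := List.pairwise_cons.mp hs
  have hsub : (rest.dropWhile (fun x => x == v)).Sublist rest := List.dropWhile_sublist _
  have htpw := hpwrest.sublist hsub
  intro w hw
  cases e : rest.dropWhile (fun x => x == v) with
  | nil => rw [e] at hw; exact absurd hw (List.not_mem_nil)
  | cons h t' =>
    rw [e] at hw htpw
    have hhf : h ≠ v := by simpa using drop_head_false e
    have hvh : v ≤ h := hvle _ (hsub.mem (by rw [e]; simp))
    have hvh' : v < h := lt_of_le_of_ne hvh (fun he => hhf he.symm)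
    rcases List.mem_cons.mp hw with rfl | hw'
    · exact hvh'
    · exact lt_of_lt_of_le hvh' ((List.pairwise_cons.mp htpw).1 w hw')

lemma mem_rle (s : List Int) (hs : s.Pairwise (· ≤ ·)) (p : Int × Int) :
    p ∈ rlePort s ↔ p.1 ∈ s ∧ p.2 = (s.count p.1 : Int) := by
  induction s using rlePort.induct with
  | case1 => simp [rlePort]
  | case2 v rest ih =>
    have hpw : (v :: rest).Pairwise (· ≤ ·) := hs
    obtain ⟨hvle, hpwrest⟩ := List.pairwise_cons.mp hpw
    have hlt := lt_of_mem_drop v rest hpw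
    have hrest : rest.takeWhile (fun x => x == v) ++ rest.dropWhile (fun x => x == v) = rest :=
      List.takeWhile_append_dropWhile
    set run := rest.takeWhile (fun x => x == v) with hrundef
    set t := rest.dropWhile (fun x => x == v) with htdef
    have hrun : ∀ x ∈ run, x = v := fun x hx => by
      have := List.mem_takeWhile_imp hx; simpa using this
    have hvt : v ∉ t := fun hv => lt_irrefl v (hlt v hv)
    have htpw : t.Pairwise (· ≤ ·) := hpwrest.sublist (List.dropWhile_sublist _)
    have hcv : (v :: rest).count v = run.length + 1 := by
      have h1 : run.count v = run.length :=
        List.count_eq_length.mpr (fun b hb => by simp [hrun b hb])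
      have h2 : t.count v = 0 := List.count_eq_zero.mpr hvt
      rw [← hrest]
      simp [List.count_append, h1, h2]
    have hcw : ∀ w, w ≠ v → (v :: rest).count w = t.count w := by
      intro w hw
      have h1 : run.count w = 0 := List.count_eq_zero.mpr (fun hmem => hw (hrun w hmem))
      rw [← hrest]
      have h3 : ¬ v = w := fun h => hw h.symm
      simp [List.count_append, h1, h3]
    rw [rlePort]
    constructor
    · intro hp
      rcases List.mem_cons.mp hp with rfl | hp'
      · refine ⟨by simp, ?_⟩
        simp only [hcv]
        push_cast
        ring
      · obtain ⟨hp1, hp2⟩ := (ih htpw).mp hp'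
        have hne : p.1 ≠ v := fun he => hvt (he ▸ hp1)
        refine ⟨by rw [← hrest]; simp [hp1], ?_⟩
        rw [hcw p.1 hne]
        exact hp2
    · rintro ⟨hp1, hp2⟩
      by_cases hne : p.1 = v
      · have h2 : p.2 = (run.length : Int) + 1 := by rw [hp2, hne, hcv]; push_cast; ring
        have hp : p = (v, (run.length : Int) + 1) := Prod.ext hne h2
        exact List.mem_cons.mpr (Or.inl (by rw [hp]))
      · right
        refine (ih htpw).mpr ⟨?_, ?_⟩
        · rw [← hrest] at hp1
          rcases List.mem_cons.mp hp1 with h | h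
          · exact absurd h hne
          · rcases List.mem_append.mp h with h' | h'
            · exact absurd (hrun _ h') hne
            · exact h'
        · rw [← hcw p.1 hne]; exact hp2

lemma rle_fst_nodup (s : List Int) (hs : s.Pairwise (· ≤ ·)) :
    ((rlePort s).map Prod.fst).Nodup := by
  induction s using rlePort.induct with
  | case1 => simp [rlePort]
  | case2 v rest ih =>
    have hpw : (v :: rest).Pairwise (· ≤ ·) := hs
    have hlt := lt_of_mem_drop v rest hpw
    have htpw : (rest.dropWhile (fun x => x == v)).Pairwise (· ≤ ·) :=
      (List.pairwise_cons.mp hpw).2.sublist (List.dropWhile_sublist _)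
    rw [rlePort, List.map_cons, List.nodup_cons]
    refine ⟨?_, ih htpw⟩
    intro hv
    rcases List.mem_map.mp hv with ⟨q, hq, hq1⟩
    have := ((mem_rle _ htpw q).mp hq).1
    have h5 : q.1 = v := by simpa using hq1
    exact lt_irrefl v (h5 ▸ hlt q.1 this)

-- sorting by pkey is permutation-invariant on good pairs with distinct first components
lemma sorted_pkey_eq (xs ys : List (Int × Int)) (hperm : xs.Perm ys)
    (hgood : ∀ p ∈ xs, goodP p) (hnd : (xs.map Prod.fst).Nodup) :
    PySem.List.sorted xs pkey = PySem.List.sorted ys pkey := by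
  symm
  apply PySem.List.sorted_eq_of_perm_of_pairwise_lt
  · exact (PySem.List.sorted_perm xs pkey false).trans hperm
  · have h1 : (PySem.List.sorted xs pkey false).Pairwise (fun a b => pkey a ≤ pkey b) :=
      PySem.List.sorted_pairwise xs pkey
    have hps : (PySem.List.sorted xs pkey false).Perm xs := PySem.List.sorted_perm xs pkey false
    have h2 : ((PySem.List.sorted xs pkey false).map Prod.fst).Nodup :=
      ((hps.map Prod.fst).nodup_iff).mpr hnd
    have h3 : (PySem.List.sorted xs pkey false).Pairwise (fun a b => a.1 ≠ b.1) :=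
      (List.pairwise_map).mp h2
    refine List.Pairwise.imp_of_mem ?_ (h1.and h3)
    intro a b ha hb hab
    obtain ⟨hle, hne⟩ := hab
    have ga := hgood a ((PySem.List.mem_sorted xs pkey false a).mp ha)
    have gb := hgood b ((PySem.List.mem_sorted xs pkey false b).mp hb)
    unfold goodP at ga gb
    unfold pkey at *
    simp only [show ((2:Int) ^ 33) = 8589934592 by norm_num] at *
    omega

-- per column, A computes B's compacted column
lemma col_eq (graph : List (List Int)) (hD : Dom_c_op graph) (cidx : Int) :
    c_op_col graph cidx = colCompact graph cidx (min (graph.length : Int) 100) := by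
  have hsto : c_op_stores graph cidx
      = PySem.Dict.counter ((PySem.List.pyRange 0 (min (graph.length : Int) 100) 1).map
          (fun r => vAt graph r cidx)) := by
    unfold c_op_stores
    rw [stores_eq_counts]
    exact ((List.foldl_map (f := fun r => vAt graph r cidx)
        (g := fun (d : PySem.Dict Int Int) x => d.insert x (d.getD x 0 + 1))).symm).trans
      (PySem.Dict.foldl_insert_getD_add_one_eq_counter _)
  set vals := (PySem.List.pyRange 0 (min (graph.length : Int) 100) 1).map
      (fun r => vAt graph r cidx) with hvals
  have hgoodval : ∀ x ∈ vals, -2147483648 ≤ x ∧ x ≤ 2147483648 := by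
    intro x hx
    rcases List.mem_map.mp hx with ⟨r, _, hr⟩
    exact hr ▸ vAt_good graph hD r cidx
  set D := PySem.Dict.counter vals with hDdef
  have hitems : D.items = (PySem.Set.ofList vals).map (fun k => (k, (vals.count k : Int))) :=
    PySem.Dict.items_counter vals
  have hitemgood : ∀ p ∈ D.items, goodP p := by
    intro p hp
    rw [hitems] at hp
    rcases List.mem_map.mp hp with ⟨k, hk, hkp⟩
    have : k ∈ vals := (PySem.Set.mem_ofList vals k).mp hk
    unfold goodP
    rw [← hkp]
    exact hgoodval k this
  have hnd : D.keys.Nodup := PySem.Dict.nodup_keys_counter vals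
  -- A's repeated re-sorting of the growing pair list is one sort of the items
  have hitems' : D.items = D.keys.map (fun k => (k, D.getD k 0)) := PySem.Dict.items_eq_map_keys D hnd 0
  have htmp : D.keys.foldl (fun tmp node =>
        PySem.List.sorted2 (tmp ++ [(node, D.getD node 0)]) (fun x => x.2) (fun x => x.1)) []
      = PySem.List.sorted D.items pkey := by
    have h1 : (D.keys.foldl (fun tmp node =>
          PySem.List.sorted2 (tmp ++ [(node, D.getD node 0)]) (fun x => x.2) (fun x => x.1)) [])
        = (D.keys.map (fun k => (k, D.getD k 0))).foldl (fun t (p : Int × Int) =>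
          PySem.List.sorted2 (t ++ [p]) (fun x => x.2) (fun x => x.1)) [] :=
      (List.foldl_map (f := fun k => (k, D.getD k 0))
        (g := fun t (p : Int × Int) =>
          PySem.List.sorted2 (t ++ [p]) (fun x => x.2) (fun x => x.1))).symm
    rw [h1, ← hitems']
    have := rep_sort D.items [] hitemgood (by simp)
    simpa using this
  -- B's sorted column and its run-length encoding
  set svals := PySem.List.sorted vals (fun x => x) with hsvals
  have hspw : svals.Pairwise (· ≤ ·) := PySem.List.sorted_pairwise vals (fun x => x)
  have hsperm : svals.Perm vals := PySem.List.sorted_perm vals (fun x => x) false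
  set P := rlePort svals with hPdef
  have hPmem : ∀ p : Int × Int, p ∈ P ↔ p.1 ∈ vals ∧ p.2 = (vals.count p.1 : Int) := by
    intro p
    rw [hPdef, mem_rle svals hspw p]
    constructor
    · rintro ⟨h1, h2⟩
      exact ⟨hsperm.mem_iff.mp h1, by rw [h2, hsperm.count_eq]⟩
    · rintro ⟨h1, h2⟩
      exact ⟨hsperm.mem_iff.mpr h1, by rw [h2, hsperm.count_eq]⟩
  have hPgood : ∀ p ∈ P, goodP p := by
    intro p hp
    have := ((hPmem p).mp hp).1
    exact hgoodval p.1 this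
  have hPnd : (P.map Prod.fst).Nodup := rle_fst_nodup svals hspw
  have hInd : D.items.Nodup := by
    rw [hitems]
    exact List.Nodup.map (fun a b h => congrArg Prod.fst h) (PySem.Set.nodup_ofList vals)
  have hperm : P.Perm D.items := by
    rw [List.perm_ext_iff_of_nodup (List.Nodup.of_map _ hPnd) hInd]
    intro p
    rw [hPmem p, hitems]
    constructor
    · rintro ⟨h1, h2⟩
      refine List.mem_map.mpr ⟨p.1, (PySem.Set.mem_ofList vals p.1).mpr h1, ?_⟩
      obtain ⟨a, b⟩ := p
      simp only at h2
      rw [h2]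
    · intro hp
      rcases List.mem_map.mp hp with ⟨k, hk, hkp⟩
      have hk' : k ∈ vals := (PySem.Set.mem_ofList vals k).mp hk
      rw [← hkp]
      exact ⟨hk', rfl⟩
  have hsort : PySem.List.sorted P pkey = PySem.List.sorted D.items pkey :=
    sorted_pkey_eq P D.items hperm hPgood hPnd
  -- put both sides in the flatMap-of-sorted form
  show (((c_op_stores graph cidx).keys.foldl (fun tmp node =>
        PySem.List.sorted2 (tmp ++ [(node, (c_op_stores graph cidx).getD node 0)])
          (fun x => x.2) (fun x => x.1)) []).foldl
        (fun tg p => if p.1 == 0 then tg else tg ++ [p.1, p.2]) [])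
    = ((PySem.List.sorted2 P (fun x => x.2) (fun x => x.1)).filter
        (fun p => p.1 != 0)).flatMap (fun p => [p.1, p.2])
  rw [hsto, htmp, tg_eq_flatMap, sorted2_eq_sorted_pkey P hPgood, hsort]
  simp

lemma pair_fold (xs : List Int) (F : Int → List Int) (s1 : List (List Int)) (s2 : Int) :
    xs.foldl (fun (st : List (List Int) × Int) c => (st.1 ++ [F c], max st.2 ((F c).length : Int)))
      (s1, s2)
    = (s1 ++ xs.map F, xs.foldl (fun m c => max m ((F c).length : Int)) s2) := by
  induction xs generalizing s1 s2 with
  | nil => simp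
  | cons c xs ih =>
    simp only [List.foldl_cons, List.map_cons]
    rw [ih]
    simp [List.append_assoc]

lemma padfold {α : Type} (l : List α) (row : List Int) :
    l.foldl (fun r _ => r ++ [(0 : Int)]) row = row ++ List.replicate l.length 0 := by
  induction l generalizing row with
  | nil => simp
  | cons a l ih =>
    simp only [List.foldl_cons, List.length_cons, List.replicate_succ]
    rw [ih]
    simp [List.append_assoc]

lemma pad_get (t : List Int) (r : Int) (h0 : 0 ≤ r) (k : Nat) :
    PySem.List.pyGetD (t ++ List.replicate k 0) r 0
      = if r < (t.length : Int) then PySem.List.pyGetD t r 0 else 0 := by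
  have hr : r = ((r.toNat : Nat) : Int) := by omega
  rw [hr, PySem.List.pyGetD_natCast, PySem.List.pyGetD_natCast]
  by_cases h : r.toNat < t.length
  · rw [if_pos (by omega)]
    rw [List.getD_append _ _ _ _ h]
  · rw [if_neg (by omega)]
    unfold List.getD
    rw [List.getElem?_append_right (by omega)]
    rcases h2 : (List.replicate k (0:Int))[r.toNat - t.length]? with _ | x
    · simp
    · have := List.mem_of_getElem? h2
      simp only [List.mem_replicate] at this
      simp [this.2]

-- the padding + transpose passes produce B's direct row construction
lemma assemble (cols : List (List Int)) (hne : cols ≠ []) :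
    reverse_port (put_zero_port cols ((cols.map (fun t => (t.length : Int))).foldl max 0))
      = (PySem.List.pyRange 0 ((cols.map (fun t => (t.length : Int))).foldl max 0) 1).map
          (fun r => cols.map (fun t => if r < (t.length : Int) then PySem.List.pyGetD t r 0 else 0)) := by
  rcases cols with _ | ⟨c0, cs⟩
  · exact absurd rfl hne
  set cols := c0 :: cs with hcols
  set M := (cols.map (fun t => (t.length : Int))).foldl max 0 with hM
  have hfold : (cols.map (fun t => (t.length : Int))).foldl max 0
      = cols.foldl (fun acc t => max acc ((t.length : Int))) 0 := List.foldl_map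
  have h0M : 0 ≤ M := by
    rw [hM, hfold]
    exact (PySem.List.le_foldl_max_int cols (fun t => (t.length : Int)) 0).1
  have hlen : ∀ t ∈ cols, (t.length : Int) ≤ M := by
    rw [hM, hfold]
    exact (PySem.List.le_foldl_max_int cols (fun t => (t.length : Int)) 0).2
  have hpad : put_zero_port cols M = cols.map (fun t => t ++ List.replicate (M.toNat - t.length) 0) := by
    unfold put_zero_port
    apply List.map_congr_left
    intro t ht
    by_cases h : (t.length : Int) < M
    · rw [if_pos h, padfold, PySem.List.length_pyRange_one,
        show (M - (t.length : Int) - 0).toNat = M.toNat - t.length from by omega]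
    · rw [if_neg h]
      have h2 : M.toNat - t.length = 0 := by omega
      rw [h2, List.replicate_zero, List.append_nil]
  have hpadlen : ∀ t ∈ cols, (t ++ List.replicate (M.toNat - t.length) (0 : Int)).length = M.toNat := by
    intro t ht
    have := hlen t ht
    simp only [List.length_append, List.length_replicate]
    omega
  have hhead : (((put_zero_port cols M).headD []).length : Int) = M := by
    rw [hpad, hcols, List.map_cons, List.headD_cons, hpadlen c0 (by rw [hcols]; simp)]
    omega
  unfold reverse_port
  rw [PySem.List.foldl_append_singleton_eq_map
    (fun cidx => (PySem.List.pyRange 0 ((put_zero_port cols M).length : Int) 1).foldl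
      (fun tmp ridx => tmp ++ [PySem.List.pyGetD (PySem.List.pyGetD (put_zero_port cols M) ridx []) cidx 0]) [])]
  rw [List.nil_append, hhead]
  apply List.map_congr_left
  intro r hr
  have h0r : 0 ≤ r := (PySem.List.mem_pyRange_one.mp hr).1
  rw [PySem.List.foldl_append_singleton_eq_map
    (fun ridx => PySem.List.pyGetD (PySem.List.pyGetD (put_zero_port cols M) ridx []) r 0)]
  rw [List.nil_append]
  have hcomp : (fun ridx => PySem.List.pyGetD (PySem.List.pyGetD (put_zero_port cols M) ridx []) r 0)
      = (fun row => PySem.List.pyGetD row r 0) ∘ (fun ridx => PySem.List.pyGetD (put_zero_port cols M) ridx []) := rfl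
  rw [hcomp, ← List.map_map, PySem.List.map_pyGetD_pyRange_zero']
  rw [hpad, List.map_map]
  apply List.map_congr_left
  intro t ht
  exact pad_get t r h0r (M.toNat - t.length)

-- ===== VERDICT (by name: the statement is the Claim_ definition above) =====
theorem c_op_spec : Claim_equal_c_op := by
  intro graph hD hP
  obtain ⟨hne, hhd, _⟩ := hP
  unfold Spec_c_op c_op c_op_alt
  simp only
  have hfoldfn : (fun (st : List (List Int) × Int) cidx =>
        (st.1 ++ [c_op_col graph cidx], max st.2 ((c_op_col graph cidx).length : Int)))
      = (fun (st : List (List Int) × Int) cidx =>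
        (st.1 ++ [colCompact graph cidx (min (graph.length : Int) 100)],
          max st.2 ((colCompact graph cidx (min (graph.length : Int) 100)).length : Int))) := by
    funext st cidx
    rw [col_eq graph hD cidx]
  rw [hfoldfn]
  rw [pair_fold (PySem.List.pyRange 0 (min ((graph.headD []).length : Int) 100) 1)
    (fun c => colCompact graph c (min (graph.length : Int) 100)) [] 0]
  simp only [List.nil_append]
  have hnc1 : 1 ≤ min ((graph.headD []).length : Int) 100 := by
    have : 0 < (graph.headD []).length := List.length_pos_iff.mpr hhd
    omega
  have hcolsne : (PySem.List.pyRange 0 (min ((graph.headD []).length : Int) 100) 1).map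
      (fun c => colCompact graph c (min (graph.length : Int) 100)) ≠ [] := by
    apply List.ne_nil_of_length_pos
    rw [List.length_map, PySem.List.length_pyRange_one]
    omega
  have hmax : (PySem.List.pyRange 0 (min ((graph.headD []).length : Int) 100) 1).foldl
        (fun m c => max m ((colCompact graph c (min (graph.length : Int) 100)).length : Int)) 0
      = (((PySem.List.pyRange 0 (min ((graph.headD []).length : Int) 100) 1).map
          (fun c => colCompact graph c (min (graph.length : Int) 100))).map
            (fun t => (t.length : Int))).foldl max 0 := by
    rw [List.foldl_map (f := fun (t : List Int) => (t.length : Int)) (g := fun (a b : Int) => max a b),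
      List.foldl_map (f := fun c => colCompact graph c (min (graph.length : Int) 100))
        (g := fun (a : Int) (t : List Int) => max a (t.length : Int))]
  rw [hmax]
  rw [assemble ((PySem.List.pyRange 0 (min ((graph.headD []).length : Int) 100) 1).map
    (fun c => colCompact graph c (min (graph.length : Int) 100))) hcolsne]
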